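-- pv_equiv track=rewrite | github.com/ulab-uiuc/live-trade-bench | examples/delta_new.py | _collect_date_range
-- ===== SOURCE A (Python) =====
-- from typing import Any, Dict, List, Optional, Tuple
--
-- def _collect_date_range(models: List[Dict]) -> Tuple[Optional[str], Optional[str]]:
--     dates: List[str] = []
--     for m in models:
--         for snap in m.get("allocationHistory", []) or []:
--             ts = (snap.get("timestamp") or "")[:10]
--             if ts:
--                 dates.append(ts)
--     if not dates:
--         return None, None
--     return min(dates), max(dates)
-- ===== SOURCE B (Python) =====
-- def _collect_date_range(models):
--     lo = hi = None
--     for m in models: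
--         for snap in m.get("allocationHistory", []) or []:
--             ts = (snap.get("timestamp") or "")[:10]
--             if ts:
--                 lo = ts if lo is None or ts < lo else lo
--                 hi = ts if hi is None or ts > hi else hi
--     return lo, hi
-- ===== Notes on version B (the rewrite author's own statement) =====
-- stated objective: simpler
-- what changed: Replaces the materialized dates list plus separate min() and max() scans with a single fused pass maintaining running lo/hi accumulators, which also removes the final emptiness branch.
import Mathlib
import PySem

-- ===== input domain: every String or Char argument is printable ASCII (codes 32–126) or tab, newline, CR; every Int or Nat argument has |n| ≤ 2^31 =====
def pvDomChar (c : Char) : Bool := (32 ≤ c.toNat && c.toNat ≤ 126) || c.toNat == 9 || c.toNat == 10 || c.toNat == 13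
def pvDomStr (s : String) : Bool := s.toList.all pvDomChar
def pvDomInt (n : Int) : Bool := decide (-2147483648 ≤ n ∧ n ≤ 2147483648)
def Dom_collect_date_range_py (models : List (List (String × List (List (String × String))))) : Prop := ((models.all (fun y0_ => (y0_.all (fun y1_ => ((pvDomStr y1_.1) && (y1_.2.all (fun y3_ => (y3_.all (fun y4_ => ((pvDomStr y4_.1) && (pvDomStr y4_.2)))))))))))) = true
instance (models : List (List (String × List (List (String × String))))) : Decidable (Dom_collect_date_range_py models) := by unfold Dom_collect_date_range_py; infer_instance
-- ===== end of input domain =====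

-- B fuses A's list-building pass and the two min/max scans into one streaming lo/hi accumulator pass (simpler, not measurably faster).

-- ===== PORT A =====
-- shared helper: ts = (snap.get("timestamp") or "")[:10]  (getD "" covers both a missing key and None→"" via `or`)
def pvTs (snap : List (String × String)) : String :=
  PySem.Str.slice (PySem.Dict.getD ⟨snap⟩ "timestamp" "") none (some 10)

-- inner-loop body of A: append ts when truthy
def pvAStep (dates : List String) (snap : List (String × String)) : List String :=
  let ts := pvTs snap
  if ts ≠ "" then dates ++ [ts] else dates

def collect_date_range_py (models : List (List (String × List (List (String × String))))) : Option String × Option String :=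
  -- dates = []; for m in models: for snap in m.get("allocationHistory", []) or []: …
  -- (`or []` is the identity on a list value and is absorbed into getD's default)
  let dates := models.foldl (fun dates m =>
    (PySem.Dict.getD ⟨m⟩ "allocationHistory" []).foldl pvAStep dates) []
  if dates.isEmpty then (none, none)
  else (PySem.List.min? dates (fun x => x), PySem.List.max? dates (fun x => x))

-- ===== PORT B =====
-- inner-loop body of B: lo = ts if lo is None or ts < lo else lo;  hi = ts if hi is None or ts > hi else hi
def pvBStep (acc : Option String × Option String) (snap : List (String × String)) : Option String × Option String :=
  let ts := pvTs snap
  if ts ≠ "" then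
    ((match acc.1 with | none => some ts | some lo => if ts < lo then some ts else some lo),
     (match acc.2 with | none => some ts | some hi => if hi < ts then some ts else some hi))
  else acc

def collect_date_range_py_alt (models : List (List (String × List (List (String × String))))) : Option String × Option String :=
  models.foldl (fun acc m =>
    (PySem.Dict.getD ⟨m⟩ "allocationHistory" []).foldl pvBStep acc) (none, none)

-- ===== PRECONDITION & SPEC =====
def Spec_collect_date_range_py (models : List (List (String × List (List (String × String))))) (out : Option String × Option String) : Prop := out = collect_date_range_py_alt models
instance (models : List (List (String × List (List (String × String))))) (out : Option String × Option String) : Decidable (Spec_collect_date_range_py models out) := by unfold Spec_collect_date_range_py; infer_instance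

-- ===== CLAIM (what is proved, stated in full; the proofs are below) =====
def Claim_equal_collect_date_range_py : Prop := ∀ (models : List (List (String × List (List (String × String))))), Dom_collect_date_range_py models → Spec_collect_date_range_py models (collect_date_range_py models)

-- ===== LEMMAS AND PROOFS =====

-- min?/max? of a list are exactly the folds B's accumulators compute
def pvMinF (acc : Option String) (t : String) : Option String :=
  match acc with | none => some t | some lo => if t < lo then some t else some lo

def pvMaxF (acc : Option String) (t : String) : Option String :=
  match acc with | none => some t | some hi => if hi < t then some t else some hi

lemma min?_eq_foldl (ds : List String) :
    PySem.List.min? ds (fun x => x) = ds.foldl pvMinF none := by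
  unfold PySem.List.min?
  congr 1; funext acc t; cases acc <;> simp [pvMinF]

lemma max?_eq_foldl (ds : List String) :
    PySem.List.max? ds (fun x => x) = ds.foldl pvMaxF none := by
  unfold PySem.List.max?
  congr 1; funext acc t; cases acc <;> simp [pvMaxF]

-- one B step from the (min,max) summary of ds is the summary of one A step
lemma bstep_summary (ds : List String) (snap : List (String × String)) :
    pvBStep (ds.foldl pvMinF none, ds.foldl pvMaxF none) snap
      = ((pvAStep ds snap).foldl pvMinF none, (pvAStep ds snap).foldl pvMaxF none) := by
  unfold pvBStep pvAStep
  by_cases h : pvTs snap ≠ "" <;> simp [h, List.foldl_append, pvMinF, pvMaxF]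

-- the inner loop preserves the summary invariant
lemma inner_summary (snaps : List (List (String × String))) (ds : List String) :
    snaps.foldl pvBStep (ds.foldl pvMinF none, ds.foldl pvMaxF none)
      = ((snaps.foldl pvAStep ds).foldl pvMinF none, (snaps.foldl pvAStep ds).foldl pvMaxF none) := by
  induction snaps generalizing ds with
  | nil => rfl
  | cons s ss ih => simpa [List.foldl_cons, bstep_summary] using ih (pvAStep ds s)

-- the outer loop preserves the summary invariant
lemma outer_summary (models : List (List (String × List (List (String × String))))) (ds : List String) :
    models.foldl (fun acc m => (PySem.Dict.getD ⟨m⟩ "allocationHistory" []).foldl pvBStep acc)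
        (ds.foldl pvMinF none, ds.foldl pvMaxF none)
      = (let dates := models.foldl (fun dates m =>
            (PySem.Dict.getD ⟨m⟩ "allocationHistory" []).foldl pvAStep dates) ds
         (dates.foldl pvMinF none, dates.foldl pvMaxF none)) := by
  induction models generalizing ds with
  | nil => rfl
  | cons m ms ih =>
      simpa [List.foldl_cons, inner_summary]
        using ih ((PySem.Dict.getD ⟨m⟩ "allocationHistory" []).foldl pvAStep ds)

-- ===== VERDICT (by name: the statement is the Claim_ definition above) =====
theorem collect_date_range_py_spec : Claim_equal_collect_date_range_py := by
  intro models _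
  unfold Spec_collect_date_range_py collect_date_range_py collect_date_range_py_alt
  have h := outer_summary models []
  simp only [List.foldl_nil] at h
  rw [h]
  cases hd : models.foldl (fun dates m =>
      (PySem.Dict.getD ⟨m⟩ "allocationHistory" []).foldl pvAStep dates) [] with
  | nil => simp
  | cons d ds =>
      simp [min?_eq_foldl, max?_eq_foldl]
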